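-- pv_equiv track=rewrite | github.com/brian033/pbc_final | user.py | transform_expected_age
-- ===== SOURCE A (Python) =====
-- def transform_expected_age(age_str):
--     matched = list()
--     for age in range(10, 100):
--         if (str(age) in str(age_str)):
--             matched.append(age)
--     matched.sort()
--     # fill in the missing age between the biggest and the smallest, for example 12, 15 => fill in 13 14
--     if len(matched) == 0:
--         return [-1]
--     if len(matched) == 1:
--         return [matched[0]]
--     if len(matched) == 2:
--         return list(range(matched[0], matched[-1] + 1))
-- ===== SOURCE B (Python) =====
-- def transform_expected_age(age_str):
--     s = str(age_str)
--     vals = set()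
--     for c1, c2 in zip(s, s[1:]):
--         if '1' <= c1 <= '9' and '0' <= c2 <= '9':
--             vals.add((ord(c1) - 48) * 10 + (ord(c2) - 48))
--     m = sorted(vals)
--     if len(m) == 0:
--         return [-1]
--     if len(m) == 1:
--         return [m[0]]
--     if len(m) == 2:
--         return list(range(m[0], m[1] + 1))
-- ===== Notes on version B (the rewrite author's own statement) =====
-- stated objective: alternative
-- what changed: Instead of testing each of the 90 two-digit numbers for substring containment (90 scans of the string), B makes one pass over adjacent character pairs of the string, collecting each digit window with a nonzero leading digit into a set, then sorts it and applies the same length branches.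
-- outside the precondition, e.g. on transform_expected_age('112233'): A returns None, B returns None
import Mathlib
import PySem

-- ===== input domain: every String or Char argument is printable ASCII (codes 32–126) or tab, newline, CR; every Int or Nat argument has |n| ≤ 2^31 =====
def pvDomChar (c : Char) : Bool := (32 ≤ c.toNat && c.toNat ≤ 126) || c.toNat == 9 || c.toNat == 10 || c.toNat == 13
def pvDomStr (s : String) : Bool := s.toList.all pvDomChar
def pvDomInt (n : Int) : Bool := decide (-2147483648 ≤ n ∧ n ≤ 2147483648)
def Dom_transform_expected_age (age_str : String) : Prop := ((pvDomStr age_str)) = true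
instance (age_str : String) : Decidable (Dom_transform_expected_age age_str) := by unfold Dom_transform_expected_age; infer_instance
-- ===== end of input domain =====

-- B replaces A's 90 substring-containment scans by a single pass over adjacent character
-- pairs collecting the two-digit windows into a set (alternative decomposition, same branches).


-- ===== PORT A =====
def transform_expected_age (age_str : String) : List Int :=
  let matched : List Int := (PySem.List.pyRange 10 100 1).foldl
    (fun acc age => if PySem.Str.isIn (PySem.Int.toStr age) age_str then acc ++ [age] else acc) []
  let m := PySem.List.sorted matched (fun x => x) false
  if m.length = 0 then [-1]
  else if m.length = 1 then [PySem.List.pyGetD m 0 0]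
  else if m.length = 2 then PySem.List.pyRange (PySem.List.pyGetD m 0 0) (PySem.List.pyGetD m (-1) 0 + 1) 1
  else []  -- Python falls off the function and returns None here; excluded by Pre_

-- ===== PORT B =====
-- the window test: '1' <= c1 <= '9' and '0' <= c2 <= '9'
def pvIsWin (c1 c2 : Char) : Bool := ('1' ≤ c1 && c1 ≤ '9') && ('0' ≤ c2 && c2 ≤ '9')
-- (ord(c1) - 48) * 10 + (ord(c2) - 48)
def pvVal (c1 c2 : Char) : Int := ((c1.toNat : Int) - 48) * 10 + ((c2.toNat : Int) - 48)

def transform_expected_age_alt (age_str : String) : List Int :=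
  let pairs := age_str.toList.zip (PySem.Str.slice age_str (some 1) none).toList
  let vals : PySem.Set Int := pairs.foldl
    (fun st p => if pvIsWin p.1 p.2 then PySem.Set.add st (pvVal p.1 p.2) else st) PySem.Set.empty
  let m := PySem.List.sorted vals (fun x => x) false
  if m.length = 0 then [-1]
  else if m.length = 1 then [PySem.List.pyGetD m 0 0]
  else if m.length = 2 then PySem.List.pyRange (PySem.List.pyGetD m 0 0) (PySem.List.pyGetD m 1 0 + 1) 1
  else []  -- Python returns None here; excluded by Pre_

-- ===== PRECONDITION & SPEC =====
-- Pre_ excludes strings in which three or more distinct two-digit numbers occur as substrings: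
-- there the Python A (and B alike) falls off the end and returns None, not a list of ints.
def Pre_transform_expected_age (age_str : String) : Prop :=
  ((PySem.List.pyRange 10 100 1).countP
    (fun a => PySem.Str.isIn (PySem.Int.toStr a) age_str)) ≤ 2
instance (age_str : String) : Decidable (Pre_transform_expected_age age_str) := by
  unfold Pre_transform_expected_age; infer_instance
def pvWitness_transform_expected_age : String := "age: 12"

def Spec_transform_expected_age (age_str : String) (out : List Int) : Prop := out = transform_expected_age_alt age_str
instance (age_str : String) (out : List Int) : Decidable (Spec_transform_expected_age age_str out) := by unfold Spec_transform_expected_age; infer_instance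

-- ===== CLAIM (what is proved, stated in full; the proofs are below) =====
def Claim_equal_transform_expected_age : Prop := ∀ (age_str : String), Dom_transform_expected_age age_str → Pre_transform_expected_age age_str → Spec_transform_expected_age age_str (transform_expected_age age_str)

-- ===== LEMMAS AND PROOFS =====

-- tens / ones digit characters of a two-digit number
def pvTens (a : Int) : Char := Char.ofNat (48 + a.toNat / 10)
def pvOnes (a : Int) : Char := Char.ofNat (48 + a.toNat % 10)

-- for every a in range(10, 100): str(a) is its two digit chars, that window passes the test,
-- and pvVal reads a back from it
theorem pv_digits : ∀ a ∈ PySem.List.pyRange 10 100 1,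
    (PySem.Int.toStr a).toList = [pvTens a, pvOnes a]
    ∧ pvIsWin (pvTens a) (pvOnes a) = true ∧ pvVal (pvTens a) (pvOnes a) = a := by
  decide

theorem pv_char_le {a b : Char} (h : a ≤ b) : a.toNat ≤ b.toNat := Fin.mk_le_mk.mp h

theorem pv_win_bounds {c1 c2 : Char} (h : pvIsWin c1 c2 = true) :
    49 ≤ c1.toNat ∧ c1.toNat ≤ 57 ∧ 48 ≤ c2.toNat ∧ c2.toNat ≤ 57 := by
  simp only [pvIsWin, Bool.and_eq_true, decide_eq_true_eq] at h
  obtain ⟨⟨h1, h2⟩, h3, h4⟩ := h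
  exact ⟨pv_char_le h1, pv_char_le h2, pv_char_le h3, pv_char_le h4⟩

-- a 2-element list is an infix iff its pair occurs among adjacent pairs
theorem pv_infix_pair (c1 c2 : Char) (l : List Char) :
    [c1, c2] <:+: l ↔ (c1, c2) ∈ l.zip l.tail := by
  induction l with
  | nil => simp
  | cons a t ih =>
    rw [List.infix_cons_iff, ih]
    cases t with
    | nil => simp
    | cons b t' =>
      simp only [List.tail_cons, List.zip_cons_cons, List.mem_cons, List.cons_prefix_cons,
        Prod.mk.injEq, List.nil_prefix, and_true]

-- membership in B's folded set
theorem pv_mem_fold (ps : List (Char × Char)) (st : List Int) (x : Int) :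
    x ∈ ps.foldl (fun st p => if pvIsWin p.1 p.2 then PySem.Set.add st (pvVal p.1 p.2) else st) st
      ↔ x ∈ st ∨ ∃ p ∈ ps, pvIsWin p.1 p.2 = true ∧ pvVal p.1 p.2 = x := by
  induction ps generalizing st with
  | nil => simp
  | cons p ps ih =>
    simp only [List.foldl_cons, List.mem_cons]
    by_cases h : pvIsWin p.1 p.2 = true
    · rw [if_pos h, ih]
      simp only [PySem.Set.mem_add]
      constructor
      · rintro (⟨hx | hx⟩ | ⟨q, hq, hw, hv⟩)
        · exact Or.inl hx
        · exact Or.inr ⟨p, Or.inl rfl, h, hx.symm⟩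
        · exact Or.inr ⟨q, Or.inr hq, hw, hv⟩
      · rintro (hx | ⟨q, (rfl | hq), hw, hv⟩)
        · exact Or.inl (Or.inl hx)
        · exact Or.inl (Or.inr hv.symm)
        · exact Or.inr ⟨q, hq, hw, hv⟩
    · rw [if_neg h, ih]
      constructor
      · rintro (hx | ⟨q, hq, hw, hv⟩)
        · exact Or.inl hx
        · exact Or.inr ⟨q, Or.inr hq, hw, hv⟩
      · rintro (hx | ⟨q, (rfl | hq), hw, hv⟩)
        · exact Or.inl hx
        · exact absurd hw h
        · exact Or.inr ⟨q, hq, hw, hv⟩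

theorem pv_nodup_fold (ps : List (Char × Char)) (st : List Int) (h : st.Nodup) :
    (ps.foldl (fun st p => if pvIsWin p.1 p.2 then PySem.Set.add st (pvVal p.1 p.2) else st) st).Nodup := by
  induction ps generalizing st with
  | nil => simpa
  | cons p ps ih =>
    simp only [List.foldl_cons]
    by_cases hw : pvIsWin p.1 p.2 = true
    · rw [if_pos hw]; exact ih _ (PySem.Set.nodup_add _ _ h)
    · rw [if_neg hw]; exact ih _ h

-- B's set and A's filtered range have the same elements
theorem pv_mem_equiv (s : String) (x : Int) :
    (x ∈ (s.toList.zip s.toList.tail).foldl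
        (fun st p => if pvIsWin p.1 p.2 then PySem.Set.add st (pvVal p.1 p.2) else st) [])
      ↔ x ∈ (PySem.List.pyRange 10 100 1).filter
          (fun a => PySem.Str.isIn (PySem.Int.toStr a) s) := by
  rw [pv_mem_fold, List.mem_filter]
  simp only [List.not_mem_nil, false_or]
  constructor
  · rintro ⟨⟨c1, c2⟩, hmem, hw, rfl⟩
    dsimp only at hw ⊢
    obtain ⟨b1, b2, b3, b4⟩ := pv_win_bounds hw
    have hrange : pvVal c1 c2 ∈ PySem.List.pyRange 10 100 1 := by
      rw [PySem.List.mem_pyRange_one]; unfold pvVal; omega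
    obtain ⟨hts, _, _⟩ := pv_digits _ hrange
    have hc1 : pvTens (pvVal c1 c2) = c1 := by
      have : 48 + (pvVal c1 c2).toNat / 10 = c1.toNat := by unfold pvVal; omega
      rw [pvTens, this, Char.ofNat_toNat]
    have hc2 : pvOnes (pvVal c1 c2) = c2 := by
      have : 48 + (pvVal c1 c2).toNat % 10 = c2.toNat := by unfold pvVal; omega
      rw [pvOnes, this, Char.ofNat_toNat]
    refine ⟨hrange, ?_⟩
    rw [PySem.Str.isIn_iff_infix, hts, hc1, hc2, pv_infix_pair]
    exact hmem
  · rintro ⟨hrange, hin⟩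
    obtain ⟨hts, hw, hv⟩ := pv_digits x hrange
    rw [PySem.Str.isIn_iff_infix, hts, pv_infix_pair] at hin
    exact ⟨(pvTens x, pvOnes x), hin, hw, hv⟩

-- A's appending loop is filter
theorem pv_foldl_filter (s : String) (l : List Int) (acc : List Int) :
    l.foldl (fun acc age => if PySem.Str.isIn (PySem.Int.toStr age) s then acc ++ [age] else acc) acc
      = acc ++ l.filter (fun a => PySem.Str.isIn (PySem.Int.toStr a) s) := by
  induction l generalizing acc with
  | nil => simp
  | cons a t ih =>
    simp only [List.foldl_cons, List.filter_cons]
    by_cases h : PySem.Str.isIn (PySem.Int.toStr a) s = true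
    · rw [if_pos h, if_pos h, ih, List.append_assoc]; rfl
    · rw [if_neg h, if_neg h, ih]

-- ===== VERDICT (by name: the statement is the Claim_ definition above) =====
theorem transform_expected_age_spec : Claim_equal_transform_expected_age := by
  intro s _ _
  unfold Spec_transform_expected_age transform_expected_age transform_expected_age_alt
  have hslice : (PySem.Str.slice s (some 1) none).toList = s.toList.tail := by
    simp [PySem.Str.slice, PySem.List.slice_from_one]
  have hF := pv_foldl_filter s (PySem.List.pyRange 10 100 1) []
  rw [List.nil_append] at hF
  set F := (PySem.List.pyRange 10 100 1).filter
      (fun a => PySem.Str.isIn (PySem.Int.toStr a) s) with hFdef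
  have hpw : F.Pairwise (fun a b => a < b) :=
    (PySem.List.pairwise_lt_pyRange_one 10 100).filter _
  have hsortA : PySem.List.sorted F (fun x => x) = F :=
    PySem.List.sorted_eq_self_of_pairwise F _ (hpw.imp (fun h => le_of_lt h))
  have hndF : F.Nodup := (PySem.List.nodup_pyRange_one 10 100).filter _
  have hndV : ((s.toList.zip s.toList.tail).foldl
      (fun st p => if pvIsWin p.1 p.2 then PySem.Set.add st (pvVal p.1 p.2) else st)
      ([] : List Int)).Nodup := pv_nodup_fold _ _ List.nodup_nil
  have hperm : F.Perm ((s.toList.zip s.toList.tail).foldl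
      (fun st p => if pvIsWin p.1 p.2 then PySem.Set.add st (pvVal p.1 p.2) else st) []) :=
    (List.perm_ext_iff_of_nodup hndF hndV).mpr (fun a => (pv_mem_equiv s a).symm)
  have hsortB : PySem.List.sorted ((s.toList.zip s.toList.tail).foldl
      (fun st p => if pvIsWin p.1 p.2 then PySem.Set.add st (pvVal p.1 p.2) else st) [])
      (fun x => x) = F :=
    PySem.List.sorted_eq_of_perm_of_pairwise_lt _ F _ hperm hpw
  simp only [hslice, hF, hsortA, PySem.Set.empty, hsortB]
  rcases F with _ | ⟨a, _ | ⟨b, t⟩⟩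
  · rfl
  · rfl
  · rcases t with _ | ⟨c, t⟩
    · simp [PySem.List.pyGetD, PySem.List.pyGet?, PySem.List.pyIdx?]
    · simp
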